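-- pv_equiv track=rewrite | github.com/AdeebIsmail/TicTacToe | fun_game.py | check_diagonal_up
-- ===== SOURCE A (Python) =====
-- def check_diagonal_up(game_board, count, r, c, player):
--     try:
--         if game_board[r][c] == player:
--             count += 1
--         else:
--             return count
--     except IndexError:
--         return count
--     return check_diagonal_up(game_board, count, r - 1, c - 1, player)
-- ===== SOURCE B (Python) =====
-- def check_diagonal_up(game_board, count, r, c, player):
--     # Phase 1: collect the cells up the diagonal until the first IndexError.
--     cells = []
--     try:
--         while True:
--             cells.append(game_board[r][c])
--             r -= 1
--             c -= 1
--     except IndexError: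
--         pass
--     # Phase 2: add the length of the prefix of cells equal to player.
--     for cell in cells:
--         if cell != player:
--             break
--         count += 1
--     return count
-- ===== Notes on version B (the rewrite author's own statement) =====
-- stated objective: alternative
-- what changed: Replaces A's single recursion that threads the running count through matching with a two-phase iterative structure: first collect the diagonal cells into a list until the first IndexError, then count the prefix equal to player.
import Mathlib
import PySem

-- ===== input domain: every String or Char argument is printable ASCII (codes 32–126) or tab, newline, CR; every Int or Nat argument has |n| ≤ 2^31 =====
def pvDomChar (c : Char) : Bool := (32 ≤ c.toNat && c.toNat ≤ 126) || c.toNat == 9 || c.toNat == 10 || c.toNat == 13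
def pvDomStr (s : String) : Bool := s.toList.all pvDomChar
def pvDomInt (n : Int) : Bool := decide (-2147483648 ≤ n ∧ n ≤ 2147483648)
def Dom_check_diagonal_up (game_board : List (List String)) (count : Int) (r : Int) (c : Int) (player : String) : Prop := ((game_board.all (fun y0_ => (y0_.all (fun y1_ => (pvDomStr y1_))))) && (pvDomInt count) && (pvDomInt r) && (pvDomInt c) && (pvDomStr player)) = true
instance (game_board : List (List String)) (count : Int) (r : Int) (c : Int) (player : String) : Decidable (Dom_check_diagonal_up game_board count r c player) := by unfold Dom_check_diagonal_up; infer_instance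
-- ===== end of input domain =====

-- B is an alternative decomposition: collect the diagonal cells until the first IndexError, then count the matching prefix; A threads the count through a single recursion.

-- ===== PORT A =====
-- game_board[r][c] inside the try: none = IndexError (from either access).
def check_diagonal_up (game_board : List (List String)) (count : Int) (r : Int) (c : Int) (player : String) : Int :=
  match h : (PySem.List.pyGet? game_board r).bind (fun row => PySem.List.pyGet? row c) with
  | none => count
  | some cell =>
    if cell == player then
      check_diagonal_up game_board (count + 1) (r - 1) (c - 1) player
    else
      count
termination_by (r + game_board.length + 1).toNat
decreasing_by
  rcases Option.bind_eq_some_iff.mp h with ⟨row, hrow, _⟩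
  have : ¬ (PySem.List.pyGet? game_board r = none) := by simp [hrow]
  rw [PySem.List.pyGet?_eq_none_iff] at this
  simp only [PySem.Raise.InRange, not_not] at this
  omega

-- ===== PORT B =====
-- Phase 1 of Source B: the while-True loop appending game_board[r][c] until IndexError.
def pvCollectDiag (game_board : List (List String)) (r : Int) (c : Int) : List String :=
  match h : (PySem.List.pyGet? game_board r).bind (fun row => PySem.List.pyGet? row c) with
  | none => []
  | some cell => cell :: pvCollectDiag game_board (r - 1) (c - 1)
termination_by (r + game_board.length + 1).toNat
decreasing_by
  rcases Option.bind_eq_some_iff.mp h with ⟨row, hrow, _⟩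
  have : ¬ (PySem.List.pyGet? game_board r = none) := by simp [hrow]
  rw [PySem.List.pyGet?_eq_none_iff] at this
  simp only [PySem.Raise.InRange, not_not] at this
  omega

-- Phase 2 of Source B: the for-loop over cells, breaking at the first mismatch.
def pvCountPrefix (cells : List String) (player : String) (count : Int) : Int :=
  match cells with
  | [] => count
  | cell :: rest => if cell != player then count else pvCountPrefix rest player (count + 1)

def check_diagonal_up_alt (game_board : List (List String)) (count : Int) (r : Int) (c : Int) (player : String) : Int :=
  pvCountPrefix (pvCollectDiag game_board r c) player count

-- ===== PRECONDITION & SPEC =====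
def Spec_check_diagonal_up (game_board : List (List String)) (count : Int) (r : Int) (c : Int) (player : String) (out : Int) : Prop := out = check_diagonal_up_alt game_board count r c player
instance (game_board : List (List String)) (count : Int) (r : Int) (c : Int) (player : String) (out : Int) : Decidable (Spec_check_diagonal_up game_board count r c player out) := by unfold Spec_check_diagonal_up; infer_instance

-- ===== CLAIM (what is proved, stated in full; the proofs are below) =====
def Claim_equal_check_diagonal_up : Prop := ∀ (game_board : List (List String)) (count : Int) (r : Int) (c : Int) (player : String), Dom_check_diagonal_up game_board count r c player → Spec_check_diagonal_up game_board count r c player (check_diagonal_up game_board count r c player)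

-- ===== LEMMAS AND PROOFS =====

theorem check_diagonal_up_eq_alt (game_board : List (List String)) (count : Int) (r : Int) (c : Int) (player : String) :
    check_diagonal_up game_board count r c player = pvCountPrefix (pvCollectDiag game_board r c) player count := by
  fun_induction check_diagonal_up game_board count r c player with
  | case1 count r c h =>
    rw [pvCollectDiag, h]
    rfl
  | case2 count r c cell heq hcond ih =>
    rw [pvCollectDiag, heq]
    have h' : cell = player := by simpa using hcond
    subst h'
    simpa [pvCountPrefix] using ih
  | case3 count r c cell heq hcond =>
    rw [pvCollectDiag, heq]
    have h' : ¬ cell = player := by simpa using hcond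
    simp [pvCountPrefix, h']

-- ===== VERDICT (by name: the statement is the Claim_ definition above) =====
theorem check_diagonal_up_spec : Claim_equal_check_diagonal_up := by
  intro game_board count r c player _
  unfold Spec_check_diagonal_up check_diagonal_up_alt
  exact check_diagonal_up_eq_alt game_board count r c player
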